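-- pv_equiv track=rewrite | github.com/SoerenPJ/ISA | ploting/gauge_comparison.py | find_hexagons
-- ===== SOURCE A (Python) =====
-- from typing import List, Tuple
--
-- def find_hexagons(
--     bonds: List[Tuple[int, int]],
--     neigh: List[List[int]],
-- ) -> List[List[int]]:
--     """
--     Find all elementary hexagonal plaquettes (6-cycles) in a honeycomb lattice.
--
--     DFS from each site looking for closed paths of length exactly 6 that return
--     to the start without revisiting any intermediate node.
--     Each hexagon is stored once via canonical sorted-vertex key.
--     """
--     bond_set = {(min(a, b), max(a, b)) for a, b in bonds}
--     hexagons: List[List[int]] = []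
--     seen: set = set()
--
--     def dfs(start: int, current: int, path: List[int]) -> None:
--         depth = len(path)
--         if depth == 6:
--             if (min(current, start), max(current, start)) in bond_set:
--                 key = tuple(sorted(path))
--                 if key not in seen:
--                     seen.add(key)
--                     hexagons.append(list(path))
--             return
--         prev = path[-1] if depth >= 1 else -1
--         for nb in neigh[current]:
--             if nb == prev:
--                 continue
--             if nb == start and depth < 5:
--                 continue
--             if nb != start and nb in path:
--                 continue
--             dfs(start, nb, path + [nb])
--
--     for start in range(len(neigh)):
--         dfs(start, start, [start])
--
--     return hexagons
-- ===== SOURCE B (Python) =====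
-- from typing import List, Tuple
--
-- def find_hexagons(
--     bonds: List[Tuple[int, int]],
--     neigh: List[List[int]],
-- ) -> List[List[int]]:
--     """
--     Find all elementary hexagonal plaquettes (6-cycles) in a honeycomb lattice.
--
--     Staged breadth-first expansion instead of DFS: starting from all length-1
--     paths [s], five list-comprehension-style passes grow every path by one
--     admissible neighbour; since iterated flat expansion enumerates leaves in
--     the same lexicographic order as a preorder DFS, a final single pass over
--     the length-6 paths closes cycles against bond_set and dedups by
--     sorted-vertex key, producing the identical list.
--     """
--     bond_set = {(a, b) if a <= b else (b, a) for a, b in bonds}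
--
--     paths = [[s] for s in range(len(neigh))]
--     for _ in range(5):
--         grown = []
--         for path in paths:
--             start, cur, depth = path[0], path[-1], len(path)
--             for nb in neigh[cur]:
--                 if nb == cur or (nb == start and depth < 5) or (nb != start and nb in path):
--                     continue
--                 grown.append(path + [nb])
--         paths = grown
--
--     hexagons: List[List[int]] = []
--     seen: set = set()
--     for path in paths:
--         s, c = path[0], path[-1]
--         edge = (c, s) if c <= s else (s, c)
--         if edge in bond_set:
--             key = tuple(sorted(path))
--             if key not in seen:
--                 seen.add(key)
--                 hexagons.append(path)
--     return hexagons
-- ===== Notes on version B (the rewrite author's own statement) =====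
-- stated objective: alternative
-- what changed: The recursive DFS is replaced by a staged level-by-level expansion: five passes grow all length-1 paths into all admissible length-6 paths (iterated flat expansion yields the DFS preorder of the uniform-depth search tree), and a separate final pass closes cycles against bond_set and dedups by sorted key.
import Mathlib
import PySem

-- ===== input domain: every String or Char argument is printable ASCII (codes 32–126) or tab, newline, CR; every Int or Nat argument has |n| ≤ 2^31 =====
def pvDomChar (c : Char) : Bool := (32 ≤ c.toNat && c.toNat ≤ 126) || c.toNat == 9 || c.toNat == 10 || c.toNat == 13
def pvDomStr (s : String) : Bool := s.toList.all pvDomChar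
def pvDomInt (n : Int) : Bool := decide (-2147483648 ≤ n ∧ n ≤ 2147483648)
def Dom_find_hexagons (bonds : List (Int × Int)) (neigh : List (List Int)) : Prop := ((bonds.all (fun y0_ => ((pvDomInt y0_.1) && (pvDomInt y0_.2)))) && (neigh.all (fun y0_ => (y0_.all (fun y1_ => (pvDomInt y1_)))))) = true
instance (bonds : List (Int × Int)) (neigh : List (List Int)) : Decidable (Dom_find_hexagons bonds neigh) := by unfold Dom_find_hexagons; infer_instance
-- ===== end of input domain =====

-- B replaces A's per-start recursive DFS by five staged whole-level expansion passes (all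
-- length-k paths grown to length k+1 at once) followed by one closure/dedup pass; same value.

-- ===== PORT A =====
-- A's inner recursive `dfs`; the Nat argument is fuel for termination only (always called
-- with fuel = 7 - len(path), so it never runs out before the depth-6 check returns).
def dfsA (neigh : List (List Int)) (bset : PySem.Set (Int × Int)) (start : Int) :
    Nat → Int → List Int → List (List Int) × PySem.Set (List Int) →
    List (List Int) × PySem.Set (List Int)
  | 0, _, _, st => st
  | f + 1, current, path, st =>
    if path.length = 6 then
      if PySem.Set.contains bset (min current start, max current start) then
        let key := PySem.List.sorted path (fun x => x) false
        if PySem.Set.contains st.2 key then st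
        else (st.1 ++ [path], PySem.Set.add st.2 key)
      else st
    else
      let prev := if 1 ≤ path.length then (PySem.List.pyGet? path (-1)).getD (-1) else (-1)
      let row := (PySem.List.pyGet? neigh current).getD []
      row.foldl (fun st nb =>
        if nb = prev then st
        else if nb = start ∧ path.length < 5 then st
        else if nb ≠ start ∧ nb ∈ path then st
        else dfsA neigh bset start f nb (path ++ [nb]) st) st

def find_hexagons (bonds : List (Int × Int)) (neigh : List (List Int)) : List (List Int) :=
  let bond_set := PySem.Set.ofList (bonds.map (fun ab => (min ab.1 ab.2, max ab.1 ab.2)))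
  ((PySem.List.pyRange 0 neigh.length 1).foldl
    (fun st s => dfsA neigh bond_set s 6 s [s] st) ([], PySem.Set.empty)).1

-- ===== PORT B =====
-- one growing pass of Source B: every path in `paths` is extended by each admissible neighbour
def growB (neigh : List (List Int)) (paths : List (List Int)) : List (List Int) :=
  paths.foldl (fun grown path =>
    let start := (PySem.List.pyGet? path 0).getD (-1)
    let cur := (PySem.List.pyGet? path (-1)).getD (-1)
    let depth := path.length
    ((PySem.List.pyGet? neigh cur).getD []).foldl (fun grown nb =>
      if nb = cur ∨ (nb = start ∧ depth < 5) ∨ (nb ≠ start ∧ nb ∈ path) then grown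
      else grown ++ [path ++ [nb]]) grown) []

def find_hexagons_alt (bonds : List (Int × Int)) (neigh : List (List Int)) : List (List Int) :=
  let bond_set := PySem.Set.ofList
    (bonds.map (fun ab => if ab.1 ≤ ab.2 then (ab.1, ab.2) else (ab.2, ab.1)))
  let paths0 := (PySem.List.pyRange 0 neigh.length 1).map (fun s => [s])
  let paths := (PySem.List.pyRange 0 5 1).foldl (fun ps _ => growB neigh ps) paths0
  (paths.foldl (fun (st : List (List Int) × PySem.Set (List Int)) path =>
    let s := (PySem.List.pyGet? path 0).getD (-1)
    let c := (PySem.List.pyGet? path (-1)).getD (-1)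
    let edge := if c ≤ s then (c, s) else (s, c)
    if PySem.Set.contains bond_set edge then
      let key := PySem.List.sorted path (fun x => x) false
      if PySem.Set.contains st.2 key then st
      else (st.1 ++ [path], PySem.Set.add st.2 key)
    else st) ([], PySem.Set.empty)).1

-- ===== PRECONDITION & SPEC =====
-- A raises IndexError exactly when some adjacency-list entry is an out-of-range site index
-- (every non-self entry is eventually used to index `neigh`); Pre_ admits all other inputs,
-- including negative in-range entries (Python wraparound, matched by the ports).
def Pre_find_hexagons (bonds : List (Int × Int)) (neigh : List (List Int)) : Prop :=
  ∀ row ∈ neigh, ∀ v ∈ row, -(neigh.length : Int) ≤ v ∧ v < (neigh.length : Int)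
instance (bonds : List (Int × Int)) (neigh : List (List Int)) : Decidable (Pre_find_hexagons bonds neigh) := by unfold Pre_find_hexagons; infer_instance

def pvWitness_find_hexagons : (List (Int × Int)) × List (List Int) :=
  ([(0, 1), (1, 2), (2, 3), (3, 4), (4, 5), (5, 0)],
   [[1, 5], [0, 2], [1, 3], [2, 4], [3, 5], [4, 0]])

def Spec_find_hexagons (bonds : List (Int × Int)) (neigh : List (List Int)) (out : List (List Int)) : Prop := out = find_hexagons_alt bonds neigh
instance (bonds : List (Int × Int)) (neigh : List (List Int)) (out : List (List Int)) : Decidable (Spec_find_hexagons bonds neigh out) := by unfold Spec_find_hexagons; infer_instance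

-- ===== CLAIM (what is proved, stated in full; the proofs are below) =====
def Claim_equal_find_hexagons : Prop := ∀ (bonds : List (Int × Int)) (neigh : List (List Int)), Dom_find_hexagons bonds neigh → Pre_find_hexagons bonds neigh → Spec_find_hexagons bonds neigh (find_hexagons bonds neigh)

-- ===== LEMMAS AND PROOFS =====

-- the admissible one-step extensions of a path (B's guard, as a filterMap)
def childrenOf (neigh : List (List Int)) (path : List Int) : List (List Int) :=
  let start := (PySem.List.pyGet? path 0).getD (-1)
  let cur := (PySem.List.pyGet? path (-1)).getD (-1)
  ((PySem.List.pyGet? neigh cur).getD []).filterMap (fun nb =>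
    if nb = cur ∨ (nb = start ∧ path.length < 5) ∨ (nb ≠ start ∧ nb ∈ path) then none
    else some (path ++ [nb]))

-- the search-tree leaves k levels below a path, in preorder
def leavesN (neigh : List (List Int)) : Nat → List Int → List (List Int)
  | 0, p => [p]
  | k + 1, p => (childrenOf neigh p).flatMap (leavesN neigh k)

-- B's closure/dedup step on one finished path
def finalF (bset : PySem.Set (Int × Int)) (st : List (List Int) × PySem.Set (List Int))
    (path : List Int) : List (List Int) × PySem.Set (List Int) :=
  let s := (PySem.List.pyGet? path 0).getD (-1)
  let c := (PySem.List.pyGet? path (-1)).getD (-1)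
  let edge := if c ≤ s then (c, s) else (s, c)
  if PySem.Set.contains bset edge then
    let key := PySem.List.sorted path (fun x => x) false
    if PySem.Set.contains st.2 key then st
    else (st.1 ++ [path], PySem.Set.add st.2 key)
  else st

lemma foldl_ite_append_eq_filterMap {σ : Type} (l : List Int) (p : Int → Prop)
    [DecidablePred p] (f : Int → σ) (acc : List σ) :
    l.foldl (fun acc nb => if p nb then acc else acc ++ [f nb]) acc
      = acc ++ l.filterMap (fun nb => if p nb then none else some (f nb)) := by
  induction l generalizing acc with
  | nil => simp
  | cons a t ih => by_cases h : p a <;> simp [h, ih]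

lemma foldl_filterMap' {α β σ : Type} (l : List α) (f : α → Option β)
    (g : σ → β → σ) (init : σ) :
    (l.filterMap f).foldl g init
      = l.foldl (fun st x => match f x with | none => st | some y => g st y) init := by
  induction l generalizing init with
  | nil => rfl
  | cons a t ih => cases h : f a <;> simp [h, ih]

lemma foldl_flatMap' {α β σ : Type} (l : List α) (g : α → List β)
    (f : σ → β → σ) (init : σ) :
    (l.flatMap g).foldl f init = l.foldl (fun st x => (g x).foldl f st) init := by
  induction l generalizing init with
  | nil => rfl
  | cons a t ih => simp [List.foldl_append, ih]

lemma growB_eq_flatMap (neigh : List (List Int)) (ps : List (List Int)) :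
    growB neigh ps = ps.flatMap (childrenOf neigh) := by
  have h : growB neigh ps = ps.foldl (fun grown path => grown ++ childrenOf neigh path) [] := by
    unfold growB
    refine PySem.List.foldl_congr_mem' _ _ _ _ (fun path _ grown => ?_)
    simpa [childrenOf] using foldl_ite_append_eq_filterMap
      ((PySem.List.pyGet? neigh ((PySem.List.pyGet? path (-1)).getD (-1))).getD [])
      (fun nb => nb = (PySem.List.pyGet? path (-1)).getD (-1)
        ∨ (nb = (PySem.List.pyGet? path 0).getD (-1) ∧ path.length < 5)
        ∨ (nb ≠ (PySem.List.pyGet? path 0).getD (-1) ∧ nb ∈ path))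
      (fun nb => path ++ [nb]) grown
  simpa using h.trans (PySem.List.foldl_append_eq_flatMap (childrenOf neigh) ps [])

lemma flatMap_leaves_step (neigh : List (List Int)) (k : Nat) :
    ∀ p, (leavesN neigh k p).flatMap (childrenOf neigh) = leavesN neigh (k + 1) p := by
  induction k with
  | zero => intro p; simp [leavesN]
  | succ k ih =>
    intro p
    show ((childrenOf neigh p).flatMap (leavesN neigh k)).flatMap (childrenOf neigh)
        = (childrenOf neigh p).flatMap (leavesN neigh (k + 1))
    rw [List.flatMap_assoc]
    exact congrArg (fun f => List.flatMap f (childrenOf neigh p)) (funext ih)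

lemma growB_flatMap (neigh : List (List Int)) (ps : List (List Int)) (k : Nat) :
    growB neigh (ps.flatMap (leavesN neigh k)) = ps.flatMap (leavesN neigh (k + 1)) := by
  rw [growB_eq_flatMap, List.flatMap_assoc]
  exact congrArg (fun f => List.flatMap f ps) (funext (flatMap_leaves_step neigh k))

lemma pyGet?_last_append (path : List Int) (nb : Int) :
    (PySem.List.pyGet? (path ++ [nb]) (-1)).getD (-1) = nb := by
  rw [PySem.List.pyGet?_neg_one_append_singleton]; rfl

lemma pyGet?_head_append (path : List Int) (hne : path ≠ []) (nb : Int) :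
    (PySem.List.pyGet? (path ++ [nb]) 0).getD (-1) = (PySem.List.pyGet? path 0).getD (-1) := by
  cases path with
  | nil => exact absurd rfl hne
  | cons a t => simp [PySem.List.pyGet?_zero_cons]

-- A's DFS from a frame equals folding B's closure step over the frame's preorder leaves
lemma dfsA_eq_leaves (neigh : List (List Int)) (bset : PySem.Set (Int × Int)) (start : Int) :
    ∀ (f : Nat) (current : Int) (path : List Int) (st : List (List Int) × PySem.Set (List Int)),
      path ≠ [] →
      (PySem.List.pyGet? path (-1)).getD (-1) = current →
      (PySem.List.pyGet? path 0).getD (-1) = start →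
      path.length + f = 7 → 1 ≤ f →
      dfsA neigh bset start f current path st = (leavesN neigh (f - 1) path).foldl (finalF bset) st := by
  intro f
  induction f with
  | zero => intro _ _ _ _ _ _ _ h; omega
  | succ k ih =>
    intro current path st hne hcur hstart hlen _
    by_cases h6 : path.length = 6
    · have hk0 : k = 0 := by omega
      subst hk0
      simp only [dfsA, if_pos h6, leavesN, List.foldl_cons, List.foldl_nil, finalF,
        hcur, hstart]
      have hedge : (if current ≤ start then (current, start) else (start, current))
          = (min current start, max current start) := by
        by_cases h : current ≤ start <;> simp [min_def, max_def, h]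
      rw [hedge]
    · have hk : 1 ≤ k := by omega
      have h1 : 1 ≤ path.length := by
        cases path with | nil => exact absurd rfl hne | cons a t => simp
      simp only [dfsA, if_neg h6, if_pos h1]
      have hstep : Nat.succ k - 1 = (k - 1) + 1 := by omega
      rw [hstep]
      show _ = (leavesN neigh ((k - 1) + 1) path).foldl (finalF bset) st
      rw [show (k - 1) + 1 = (k - 1) + 1 from rfl]
      simp only [leavesN]
      rw [foldl_flatMap']
      simp only [childrenOf]
      rw [hcur, hstart, foldl_filterMap']
      refine PySem.List.foldl_congr_mem _ _ _ _ (fun st' nb _ => ?_)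
      by_cases g1 : nb = current
      · simp [g1]
      · by_cases g2 : nb = start ∧ path.length < 5
        · simp [g2]
        · by_cases g3 : nb ≠ start ∧ nb ∈ path
          · simp [g1, g3]
          · have hsel : (if nb = current ∨ (nb = start ∧ path.length < 5)
                ∨ (nb ≠ start ∧ nb ∈ path) then (none : Option (List Int))
                else some (path ++ [nb])) = some (path ++ [nb]) := by
              rw [if_neg]; tauto
            simp only [if_neg g1, if_neg g2, if_neg g3, hsel]
            exact ih nb (path ++ [nb]) st' (by simp)
              (pyGet?_last_append path nb)
              ((pyGet?_head_append path hne nb).trans hstart)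
              (by simpa using by omega) hk

lemma bset_eq (bonds : List (Int × Int)) :
    PySem.Set.ofList (bonds.map (fun ab => if ab.1 ≤ ab.2 then (ab.1, ab.2) else (ab.2, ab.1)))
      = PySem.Set.ofList (bonds.map (fun ab => (min ab.1 ab.2, max ab.1 ab.2))) := by
  congr 1
  apply List.map_congr_left
  intro ab _
  by_cases h : ab.1 ≤ ab.2 <;> simp [min_def, max_def, h]

-- ===== VERDICT (by name: the statement is the Claim_ definition above) =====
theorem find_hexagons_spec : Claim_equal_find_hexagons := by
  intro bonds neigh _ _
  unfold Spec_find_hexagons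
  simp only [find_hexagons, find_hexagons_alt]
  rw [bset_eq]
  set bset := PySem.Set.ofList (bonds.map (fun ab => (min ab.1 ab.2, max ab.1 ab.2))) with hbset
  have hrange : PySem.List.pyRange 0 5 1 = [0, 1, 2, 3, 4] := by decide
  rw [hrange]
  simp only [List.foldl_cons, List.foldl_nil]
  set ps0 := (PySem.List.pyRange 0 neigh.length 1).map (fun s => [s]) with hps0
  have hbase : ps0 = ps0.flatMap (leavesN neigh 0) := by
    simp [leavesN]
  have hgrow : growB neigh (growB neigh (growB neigh (growB neigh (growB neigh ps0))))
      = ps0.flatMap (leavesN neigh 5) := by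
    have e1 : growB neigh ps0 = ps0.flatMap (leavesN neigh 1) := by
      conv_lhs => rw [hbase]
      exact growB_flatMap neigh ps0 0
    rw [e1, growB_flatMap, growB_flatMap, growB_flatMap, growB_flatMap]
  rw [hgrow, hps0, List.flatMap_map, foldl_flatMap']
  congr 1
  refine PySem.List.foldl_congr_mem _ _ _ _ (fun st s _ => ?_)
  rw [dfsA_eq_leaves neigh bset s 6 s [s] st (by simp)
    (by rw [PySem.List.pyGet?_neg_one]; rfl) (by rw [PySem.List.pyGet?_zero_cons]; rfl)
    (by simp) (by omega)]
  rfl
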